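-- pv_equiv track=rewrite | github.com/BenAladjem/Battery-life-calculation-project | calculations/calc.py | one_iteration_capacity
-- ===== SOURCE A (Python) =====
-- def one_iteration_capacity(typ, rep, slp, wrk, src):
--     iter_cap = 0
--     for ch in typ:
--         if ch == 'R':
--             iter_cap += rep
--         elif ch == 'W':
--             iter_cap += wrk
--         elif ch == 'S':
--             iter_cap += slp
--         elif ch == 'C':
--             iter_cap += src
--     return iter_cap
-- ===== SOURCE B (Python) =====
-- def one_iteration_capacity(typ, rep, slp, wrk, src):
--     counts = {}
--     for ch in typ:
--         counts[ch] = counts.get(ch, 0) + 1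
--     return (rep * counts.get('R', 0) + wrk * counts.get('W', 0)
--             + slp * counts.get('S', 0) + src * counts.get('C', 0))
-- ===== Notes on version B (the rewrite author's own statement) =====
-- stated objective: alternative
-- what changed: B first builds a character frequency dict in one counting pass, then returns a constant-size weighted combination of the four relevant counts, replacing A's per-character branch-and-accumulate loop.
import Mathlib
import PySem

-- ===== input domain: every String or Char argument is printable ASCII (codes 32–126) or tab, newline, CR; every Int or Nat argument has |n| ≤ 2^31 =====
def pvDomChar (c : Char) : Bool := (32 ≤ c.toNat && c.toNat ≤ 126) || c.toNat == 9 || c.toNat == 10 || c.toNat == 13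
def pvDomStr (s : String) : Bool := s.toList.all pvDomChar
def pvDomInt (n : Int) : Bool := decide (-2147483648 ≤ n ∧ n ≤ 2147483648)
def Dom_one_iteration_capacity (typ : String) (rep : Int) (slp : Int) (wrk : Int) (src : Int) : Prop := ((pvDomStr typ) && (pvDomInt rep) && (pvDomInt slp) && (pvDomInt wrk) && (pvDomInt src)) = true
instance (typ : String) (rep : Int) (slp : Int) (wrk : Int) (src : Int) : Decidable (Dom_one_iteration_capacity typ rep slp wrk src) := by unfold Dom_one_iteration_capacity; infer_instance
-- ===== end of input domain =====

-- B replaces A's per-character branch-and-accumulate loop by a count-then-weighted-sum: one frequency-dict pass, then a constant-size combination (alternative decomposition, same cost).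
-- ===== PORT A =====
def one_iteration_capacity (typ : String) (rep : Int) (slp : Int) (wrk : Int) (src : Int) : Int :=
  typ.toList.foldl (fun iter_cap ch =>
    if ch == 'R' then iter_cap + rep
    else if ch == 'W' then iter_cap + wrk
    else if ch == 'S' then iter_cap + slp
    else if ch == 'C' then iter_cap + src
    else iter_cap) 0

-- ===== PORT B =====
def one_iteration_capacity_alt (typ : String) (rep : Int) (slp : Int) (wrk : Int) (src : Int) : Int :=
  let counts : PySem.Dict Char Int :=
    typ.toList.foldl (fun d ch => d.insert ch (d.getD ch 0 + 1)) PySem.Dict.empty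
  rep * counts.getD 'R' 0 + wrk * counts.getD 'W' 0
    + slp * counts.getD 'S' 0 + src * counts.getD 'C' 0

-- ===== PRECONDITION & SPEC =====
def Spec_one_iteration_capacity (typ : String) (rep : Int) (slp : Int) (wrk : Int) (src : Int) (out : Int) : Prop := out = one_iteration_capacity_alt typ rep slp wrk src
instance (typ : String) (rep : Int) (slp : Int) (wrk : Int) (src : Int) (out : Int) : Decidable (Spec_one_iteration_capacity typ rep slp wrk src out) := by unfold Spec_one_iteration_capacity; infer_instance

-- ===== CLAIM (what is proved, stated in full; the proofs are below) =====
def Claim_equal_one_iteration_capacity : Prop := ∀ (typ : String) (rep : Int) (slp : Int) (wrk : Int) (src : Int), Dom_one_iteration_capacity typ rep slp wrk src → Spec_one_iteration_capacity typ rep slp wrk src (one_iteration_capacity typ rep slp wrk src)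

-- ===== LEMMAS AND PROOFS =====

-- ===== VERDICT (by name: the statement is the Claim_ definition above) =====
lemma weighted_foldl (rep slp wrk src : Int) (l : List Char) (a : Int) :
    l.foldl (fun iter_cap ch =>
      if ch == 'R' then iter_cap + rep
      else if ch == 'W' then iter_cap + wrk
      else if ch == 'S' then iter_cap + slp
      else if ch == 'C' then iter_cap + src
      else iter_cap) a
    = a + rep * (l.count 'R' : Int) + wrk * (l.count 'W' : Int)
        + slp * (l.count 'S' : Int) + src * (l.count 'C' : Int) := by
  induction l generalizing a with
  | nil => simp
  | cons c t ih =>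
    simp only [List.foldl_cons, ih, List.count_cons]
    by_cases h1 : c = 'R' <;> by_cases h2 : c = 'W' <;> by_cases h3 : c = 'S' <;>
      by_cases h4 : c = 'C' <;> simp_all <;> push_cast <;> try ring

theorem one_iteration_capacity_spec : Claim_equal_one_iteration_capacity := by
  intro typ rep slp wrk src _
  unfold Spec_one_iteration_capacity one_iteration_capacity one_iteration_capacity_alt
  simp only [PySem.Dict.getD_foldl_insert_add_one, weighted_foldl, PySem.Dict.getD_empty]
  ring
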